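-- pv_equiv track=rewrite | github.com/XiaoSX/leetcode | title_3/t2.py | perfectMenu
-- ===== SOURCE A (Python) =====
-- from typing import List
--
-- def perfectMenu(materials: List[int], cookbooks: List[List[int]], attribute: List[List[int]], limit: int) -> int:
--     options = []
--     n = len(cookbooks)
--     def search(m, target, ans):
--         if m == n:
--             options.append(list(ans))
--             return
--
--         c1, c2, c3, c4, c5 = target
--         m1, m2, m3, m4, m5 = cookbooks[m]
--         if c1 >= m1 and c2 >= m2 and c3 >= m3 and c4 >= m4 and c5 >= m5:
--             search(m + 1, [c1 - m1, c2 - m2, c3 - m3, c4 - m4, c5- m5], ans + [m])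
--         search(m + 1, target, ans)
--
--     search(0, materials, [])
--     max_v = -1
--     for i in range(len(options)):
--         a = 0
--         b = 0
--         for j in options[i]:
--             x, y = attribute[j]
--             a += x
--             b += y
--         if b >= limit:
--             max_v = max(max_v, a)
--
--     return max_v
-- ===== SOURCE B (Python) =====
-- from typing import List
--
-- def perfectMenu(materials: List[int], cookbooks: List[List[int]], attribute: List[List[int]], limit: int) -> int:
--     # iterative state expansion: each state = (remaining materials, a-sum, b-sum)
--     states = [(materials, 0, 0)]
--     for cost, attr in zip(cookbooks, attribute):
--         m1, m2, m3, m4, m5 = cost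
--         new_states = []
--         for rem, a, b in states:
--             new_states.append((rem, a, b))
--             c1, c2, c3, c4, c5 = rem
--             if c1 >= m1 and c2 >= m2 and c3 >= m3 and c4 >= m4 and c5 >= m5:
--                 x, y = attr
--                 new_states.append(([c1 - m1, c2 - m2, c3 - m3, c4 - m4, c5 - m5], a + x, b + y))
--         states = new_states
--     return max([-1] + [a for _, a, b in states if b >= limit])
-- ===== Notes on version B (the rewrite author's own statement) =====
-- stated objective: alternative
-- what changed: Replaces A's recursive DFS that materialises every feasible index subset and then rescans each subset against attribute with a single iterative pass maintaining a list of partial states (remaining materials, a-sum, b-sum), taking the max at the end.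
-- outside the precondition, e.g. on perfectMenu([0, 0, 0, 0, 0], [[1, 1, 1, 1, 1]], [], 0): A returns 0, B returns 0
import Mathlib
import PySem

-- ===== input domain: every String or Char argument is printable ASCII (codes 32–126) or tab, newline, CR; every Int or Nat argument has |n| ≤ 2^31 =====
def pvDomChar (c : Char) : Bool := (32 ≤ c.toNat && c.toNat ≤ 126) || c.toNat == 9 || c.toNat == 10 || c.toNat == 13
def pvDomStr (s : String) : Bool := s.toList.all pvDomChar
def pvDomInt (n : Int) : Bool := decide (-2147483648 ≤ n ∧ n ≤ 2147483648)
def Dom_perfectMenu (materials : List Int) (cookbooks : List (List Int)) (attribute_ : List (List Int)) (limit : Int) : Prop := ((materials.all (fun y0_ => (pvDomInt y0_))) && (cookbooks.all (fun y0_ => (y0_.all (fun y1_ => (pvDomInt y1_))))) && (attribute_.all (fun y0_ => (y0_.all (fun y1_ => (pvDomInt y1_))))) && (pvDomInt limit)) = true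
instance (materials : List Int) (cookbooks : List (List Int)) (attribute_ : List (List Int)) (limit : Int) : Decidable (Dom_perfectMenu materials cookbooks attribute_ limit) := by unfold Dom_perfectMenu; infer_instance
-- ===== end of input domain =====

-- B replaces A's recursive subset enumeration + rescan with one iterative pass over a maintained
-- list of partial states (remaining materials, a-sum, b-sum); same results, different decomposition.


-- ===== PORT A =====
-- A's inner `search`: DFS over indices m..n-1, include-branch first; collects the finished
-- index lists (`options`).  The Python tuple-unpacks target and cookbooks[m] into 5 components;
-- the `| _, _ => []` arm is where Python would raise (excluded by Pre_).
def pySearchA : List (List Int) → Int → List Int → List Int → List (List Int)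
  | [], _, _, ans => [ans]
  | cb :: rest, m, target, ans =>
    match target, cb with
    | [c1, c2, c3, c4, c5], [m1, m2, m3, m4, m5] =>
      (if m1 ≤ c1 ∧ m2 ≤ c2 ∧ m3 ≤ c3 ∧ m4 ≤ c4 ∧ m5 ≤ c5 then
        pySearchA rest (m + 1) [c1 - m1, c2 - m2, c3 - m3, c4 - m4, c5 - m5] (ans ++ [m])
      else [])
      ++ pySearchA rest (m + 1) target ans
    | _, _ => []

-- A's inner scan of one option: a += x, b += y over attribute[j]; the fallback arms are where
-- Python would raise (excluded by Pre_).
def pySumAB (attribute_ : List (List Int)) (opt : List Int) : Int × Int :=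
  opt.foldl (fun ab j =>
    match PySem.List.pyGet? attribute_ j with
    | some [x, y] => (ab.1 + x, ab.2 + y)
    | _ => ab) (0, 0)

def perfectMenu (materials : List Int) (cookbooks : List (List Int)) (attribute_ : List (List Int)) (limit : Int) : Int :=
  let options := pySearchA cookbooks 0 materials []
  options.foldl (fun mv opt =>
    let ab := pySumAB attribute_ opt
    if limit ≤ ab.2 then max mv ab.1 else mv) (-1)

-- ===== PORT B =====
-- `c1..c5 >= m1..m5` after B's five-way unpacks; the fallback arms are where Python
-- would raise a ValueError (B's Python never returns then, so nothing is claimed there)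
def affordB (rem cost : List Int) : Bool :=
  match rem, cost with
  | [c1, c2, c3, c4, c5], [m1, m2, m3, m4, m5] =>
    decide (m1 ≤ c1 ∧ m2 ≤ c2 ∧ m3 ≤ c3 ∧ m4 ≤ c4 ∧ m5 ≤ c5)
  | _, _ => false

-- the new remaining-materials list `[c1 - m1, ...]`
def subB (rem cost : List Int) : List Int :=
  match rem, cost with
  | [c1, c2, c3, c4, c5], [m1, m2, m3, m4, m5] =>
    [c1 - m1, c2 - m2, c3 - m3, c4 - m4, c5 - m5]
  | _, _ => rem

-- `x, y = attr` (Python raises on a non-pair; there the port reads (0, 0) — B's Python never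
-- returns on such an input, so nothing is claimed about that value)
def xyOf (l : List Int) : Int × Int :=
  match l with
  | [x, y] => (x, y)
  | _ => (0, 0)

-- one pass of B's inner loop: keep every state, and add the include-state when affordable
def stepB (states : List (List Int × Int × Int)) (ca : List Int × List Int) : List (List Int × Int × Int) :=
  states.flatMap (fun s =>
    if affordB s.1 ca.1 then
      [s, (subB s.1 ca.1, s.2.1 + (xyOf ca.2).1, s.2.2 + (xyOf ca.2).2)]
    else [s])

def perfectMenu_alt (materials : List Int) (cookbooks : List (List Int)) (attribute_ : List (List Int)) (limit : Int) : Int :=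
  let states := (cookbooks.zip attribute_).foldl stepB [(materials, 0, 0)]
  ((states.filter (fun s => limit ≤ s.2.2)).map (fun s => s.2.1)).foldl max (-1)

-- ===== PRECONDITION & SPEC =====
-- Pre_ excludes inputs whose materials or cookbook rows are not length 5 (A always unpacks them and
-- raises) and inputs with fewer attribute rows than cookbooks (A raises an IndexError whenever such a
-- cookbook is ever selectable; in the corner where none is, A returns but B's zip silently truncates).
-- On admitted inputs both Pythons still raise, identically, iff a selectable cookbook's attribute row
-- is not a pair; no return value is claimed there.
def Pre_perfectMenu (materials : List Int) (cookbooks : List (List Int)) (attribute_ : List (List Int)) (limit : Int) : Prop :=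
  (cookbooks = [] ∨ materials.length = 5) ∧ (∀ cb ∈ cookbooks, cb.length = 5) ∧
  cookbooks.length ≤ attribute_.length
instance (materials : List Int) (cookbooks : List (List Int)) (attribute_ : List (List Int)) (limit : Int) : Decidable (Pre_perfectMenu materials cookbooks attribute_ limit) := by unfold Pre_perfectMenu; infer_instance

def pvWitness_perfectMenu : List Int × List (List Int) × List (List Int) × Int :=
  ([1, 1, 1, 1, 1], [[1, 0, 0, 0, 0], [0, 0, 0, 0, 2]], [[3, 2], [1, 1]], 1)

def Spec_perfectMenu (materials : List Int) (cookbooks : List (List Int)) (attribute_ : List (List Int)) (limit : Int) (out : Int) : Prop := out = perfectMenu_alt materials cookbooks attribute_ limit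
instance (materials : List Int) (cookbooks : List (List Int)) (attribute_ : List (List Int)) (limit : Int) (out : Int) : Decidable (Spec_perfectMenu materials cookbooks attribute_ limit out) := by unfold Spec_perfectMenu; infer_instance

-- ===== CLAIM (what is proved, stated in full; the proofs are below) =====
def Claim_equal_perfectMenu : Prop := ∀ (materials : List Int) (cookbooks : List (List Int)) (attribute_ : List (List Int)) (limit : Int), Dom_perfectMenu materials cookbooks attribute_ limit → Pre_perfectMenu materials cookbooks attribute_ limit → Spec_perfectMenu materials cookbooks attribute_ limit (perfectMenu materials cookbooks attribute_ limit)

-- ===== LEMMAS AND PROOFS =====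

-- reference enumeration of the (a,b) values of all feasible subsets of the zipped
-- (cookbook, attribute-pair) list, include-branch first (matching A's DFS order)
def valsR : List (List Int × List Int) → List Int → Int × Int → List (Int × Int)
  | [], _, ab => [ab]
  | c :: rest, rem, ab =>
    (if affordB rem c.1 then
      valsR rest (subB rem c.1) (ab.1 + (xyOf c.2).1, ab.2 + (xyOf c.2).2)
    else [])
    ++ valsR rest rem ab

theorem len5_exists (l : List Int) (h : l.length = 5) :
    ∃ a b c d e, l = [a, b, c, d, e] := by
  rcases l with _ | ⟨a, _ | ⟨b, _ | ⟨c, _ | ⟨d, _ | ⟨e, _ | ⟨f, t⟩⟩⟩⟩⟩⟩ <;> simp_all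

theorem pySumAB_append (attribute_ : List (List Int)) (ans : List Int) (m : Int) (r : List Int)
    (h : PySem.List.pyGet? attribute_ m = some r) :
    pySumAB attribute_ (ans ++ [m]) =
      ((pySumAB attribute_ ans).1 + (xyOf r).1, (pySumAB attribute_ ans).2 + (xyOf r).2) := by
  rcases r with _ | ⟨x, _ | ⟨y, _ | ⟨z, t⟩⟩⟩ <;> simp [pySumAB, List.foldl_append, h, xyOf]

-- A-side: the DFS's options, mapped through the rescan, are exactly valsR of the zipped suffix
theorem searchA_vals (attribute_ : List (List Int)) :
    ∀ (cbs : List (List Int)) (m : Nat) (target ans : List Int),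
      (cbs ≠ [] → target.length = 5) → (∀ cb ∈ cbs, cb.length = 5) →
      m + cbs.length ≤ attribute_.length →
      (pySearchA cbs (m : Int) target ans).map (pySumAB attribute_) =
        valsR (cbs.zip (attribute_.drop m)) target (pySumAB attribute_ ans) := by
  intro cbs
  induction cbs with
  | nil => intro m target ans _ _ _; simp [pySearchA, valsR]
  | cons cb rest ih =>
    intro m target ans ht5 hc5 hmlen
    obtain ⟨c1, c2, c3, c4, c5, rfl⟩ := len5_exists target (ht5 (by simp))
    obtain ⟨m1, m2, m3, m4, m5, rfl⟩ := len5_exists cb (hc5 cb (by simp))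
    have hm : m < attribute_.length := by simp at hmlen; omega
    have hdrop : attribute_.drop m = attribute_[m] :: attribute_.drop (m + 1) :=
      List.drop_eq_getElem_cons hm
    have hget : PySem.List.pyGet? attribute_ (m : Int) = some attribute_[m] :=
      PySem.List.pyGet?_ofNat _ _ hm
    have hrlen : m + 1 + rest.length ≤ attribute_.length := by simp at hmlen; omega
    have hsub : subB [c1, c2, c3, c4, c5] [m1, m2, m3, m4, m5] =
        [c1 - m1, c2 - m2, c3 - m3, c4 - m4, c5 - m5] := by simp [subB]
    have haff : (affordB [c1, c2, c3, c4, c5] [m1, m2, m3, m4, m5] = true) ↔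
        (m1 ≤ c1 ∧ m2 ≤ c2 ∧ m3 ≤ c3 ∧ m4 ≤ c4 ∧ m5 ≤ c5) := by
      simp [affordB]
    have hcast : ((m : Int) + 1) = ((m + 1 : Nat) : Int) := by push_cast; ring
    rw [hdrop]
    simp only [pySearchA, List.zip_cons_cons, valsR, hsub, List.map_append]
    have hc5' : ∀ c ∈ rest, c.length = 5 := fun c hc => hc5 c (List.mem_cons_of_mem _ hc)
    by_cases hA : m1 ≤ c1 ∧ m2 ≤ c2 ∧ m3 ≤ c3 ∧ m4 ≤ c4 ∧ m5 ≤ c5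
    · rw [if_pos hA, if_pos (haff.mpr hA), hcast,
        ih (m + 1) [c1 - m1, c2 - m2, c3 - m3, c4 - m4, c5 - m5] (ans ++ [(m : Int)])
          (fun _ => rfl) hc5' hrlen,
        ih (m + 1) [c1, c2, c3, c4, c5] ans (fun _ => rfl) hc5' hrlen,
        pySumAB_append attribute_ ans (m : Int) attribute_[m] hget]
    · rw [if_neg hA, if_neg (fun h => hA (haff.mp h)), hcast,
        ih (m + 1) [c1, c2, c3, c4, c5] ans (fun _ => rfl) hc5' hrlen]
      simp

-- B-side: the projected states are a permutation of valsR, for any starting state list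
theorem foldB_perm :
    ∀ (Z : List (List Int × List Int)) (states : List (List Int × Int × Int)),
      ((Z.foldl stepB states).map (fun s => s.2)).Perm
        (states.flatMap (fun s => valsR Z s.1 s.2)) := by
  intro Z
  induction Z with
  | nil =>
    intro states
    simp only [List.foldl_nil, valsR]
    exact (List.map_eq_flatMap ▸ List.Perm.refl _)
  | cons c rest ih =>
    intro states
    refine (ih (stepB states c)).trans ?_
    simp only [stepB, List.flatMap_assoc]
    refine List.Perm.flatMap_left states ?_
    intro s _
    by_cases ha : affordB s.1 c.1 = true
    · simp only [valsR, ha, if_pos]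
      simp
      exact List.perm_append_comm
    · simp [valsR, ha]

theorem foldl_filter_map_max (limit : Int) :
    ∀ (l : List (List Int × Int × Int)) (acc : Int),
      ((l.filter (fun s => limit ≤ s.2.2)).map (fun s => s.2.1)).foldl max acc =
        (l.map (fun s => s.2)).foldl
          (fun mv p => if limit ≤ p.2 then max mv p.1 else mv) acc := by
  intro l
  induction l with
  | nil => intro acc; rfl
  | cons s t ih =>
    intro acc
    by_cases h : limit ≤ s.2.2 <;> simp [List.filter, h, ih]

-- ===== VERDICT (by name: the statement is the Claim_ definition above) =====
theorem perfectMenu_spec : Claim_equal_perfectMenu := by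
  intro mats cbs attr limit _ hpre
  obtain ⟨h5, hc5, hlen⟩ := hpre
  show perfectMenu mats cbs attr limit = perfectMenu_alt mats cbs attr limit
  have hA : perfectMenu mats cbs attr limit =
      (valsR (cbs.zip attr) mats (0, 0)).foldl
        (fun mv p => if limit ≤ p.2 then max mv p.1 else mv) (-1) := by
    have h := searchA_vals attr cbs 0 mats []
      (fun hne => h5.resolve_left hne) hc5 (by simpa using hlen)
    have h0 : pySumAB attr [] = (0, 0) := rfl
    rw [h0] at h
    simp only [Nat.cast_zero, List.drop_zero] at h
    simp only [perfectMenu, ← h, List.foldl_map]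
  have hB : perfectMenu_alt mats cbs attr limit =
      (((cbs.zip attr).foldl stepB [(mats, 0, 0)]).map (fun s => s.2)).foldl
        (fun mv p => if limit ≤ p.2 then max mv p.1 else mv) (-1) := by
    simp only [perfectMenu_alt]
    exact foldl_filter_map_max limit _ (-1)
  have hperm : (((cbs.zip attr).foldl stepB [(mats, 0, 0)]).map (fun s => s.2)).Perm
      (valsR (cbs.zip attr) mats (0, 0)) := by
    simpa using foldB_perm (cbs.zip attr) [(mats, 0, 0)]
  rw [hA, hB]
  exact (@List.Perm.foldl_eq _ _ _ _ _
    ⟨by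
      intro b p q
      split_ifs <;> simp [max_comm, max_left_comm]⟩
    hperm (-1)).symm
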